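-- pv_equiv track=rewrite | github.com/Mizbhafathima/people-discovery | backend/services/extractor/gliner_extractor.py | pair_persons_with_titles
-- ===== SOURCE A (Python) =====
-- from typing import List, Dict
--
-- def pair_persons_with_titles(
--
--     text: str,
--     ner_results: Dict[str, List[str]]
-- ) -> List[dict]:
--     """Pairs person names with nearest job titles in text."""
--     persons = ner_results.get("persons", [])
--     job_titles = ner_results.get("job_titles", [])
--     if not persons:
--         return []
--     lines = text.split("\n")
--     paired = []
--     for person in persons:
--         person_line = None
--         for i, line in enumerate(lines):
--             if person.lower() in line.lower():
--                 person_line = i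
--                 break
--         if person_line is None:
--             paired.append({"name": person, "job_title": None})
--             continue
--         best_title = None
--         min_distance = float("inf")
--         for title in job_titles:
--             for i, line in enumerate(lines):
--                 if title.lower() in line.lower():
--                     distance = abs(i - person_line)
--                     if distance < min_distance and distance <= 5:
--                         min_distance = distance
--                         best_title = title
--         paired.append({"name": person, "job_title": best_title})
--     return paired
-- ===== SOURCE B (Python) =====
-- def pair_persons_with_titles(text, ner_results):
--     """Pairs person names with nearest job titles in text (single scan per title)."""
--     persons = ner_results.get("persons", [])
--     job_titles = ner_results.get("job_titles", [])
--     if not persons: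
--         return []
--     low_lines = [ln.lower() for ln in text.split("\n")]
--     occ = [[i for i, ln in enumerate(low_lines) if title.lower() in ln]
--            for title in job_titles]
--     paired = []
--     for person in persons:
--         lp = person.lower()
--         person_line = next((i for i, ln in enumerate(low_lines) if lp in ln), None)
--         if person_line is None:
--             paired.append({"name": person, "job_title": None})
--             continue
--         best_title, best_d = None, None
--         for title, idxs in zip(job_titles, occ):
--             ds = [abs(i - person_line) for i in idxs if abs(i - person_line) <= 5]
--             if ds:
--                 m = min(ds)
--                 if best_d is None or m < best_d:
--                     best_title, best_d = title, m
--         paired.append({"name": person, "job_title": best_title})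
--     return paired
-- ===== Notes on version B (the rewrite author's own statement) =====
-- stated objective: alternative
-- what changed: B lowercases and splits the text once and precomputes, per job title, the list of line indices containing it, so the per-person work scans those index lists instead of re-running substring search over every line for every (person, title) pair.
import Mathlib
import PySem

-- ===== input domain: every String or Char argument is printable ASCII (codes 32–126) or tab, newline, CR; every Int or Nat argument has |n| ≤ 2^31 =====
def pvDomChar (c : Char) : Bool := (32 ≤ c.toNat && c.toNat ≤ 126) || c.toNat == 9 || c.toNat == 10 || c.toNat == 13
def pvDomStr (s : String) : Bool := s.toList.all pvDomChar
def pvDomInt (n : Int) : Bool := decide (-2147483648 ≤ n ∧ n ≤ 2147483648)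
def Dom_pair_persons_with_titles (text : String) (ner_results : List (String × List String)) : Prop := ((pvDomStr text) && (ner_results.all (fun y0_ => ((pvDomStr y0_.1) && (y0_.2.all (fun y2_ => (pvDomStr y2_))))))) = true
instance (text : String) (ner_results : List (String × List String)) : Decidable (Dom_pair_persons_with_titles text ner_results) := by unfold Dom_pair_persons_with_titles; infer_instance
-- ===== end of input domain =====

-- B precomputes lowercased lines and, per job title, the line indices containing it, so the
-- per-person loop scans index lists instead of re-searching every line (alternative algorithm,
-- same return value on all inputs).

-- 'd < best' where best = none models A's float('inf') and B's None (distances are ints)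
def pvLtInf (d : Int) (o : Option Int) : Bool :=
  match o with | none => true | some b => decide (d < b)

-- ===== PORT A =====
-- the for/break loop finding the first line whose lowercase contains the lowercase person
def pvPersonLineA (lines : List String) (person : String) : Option Int :=
  (PySem.List.enumerate lines 0).foldl
    (fun acc p =>
      match acc with
      | some x => some x
      | none => if PySem.Str.isIn (PySem.Str.lower person) (PySem.Str.lower p.2) then some p.1 else none)
    none

-- the title × line double loop; state (best_title, min_distance), min_distance none = float('inf')
def pvBestTitleA (lines : List String) (job_titles : List String) (person_line : Int) : Option String :=
  (job_titles.foldl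
    (fun (st : Option String × Option Int) title =>
      (PySem.List.enumerate lines 0).foldl
        (fun st p =>
          if PySem.Str.isIn (PySem.Str.lower title) (PySem.Str.lower p.2) then
            if pvLtInf (|p.1 - person_line|) st.2 && decide ((|p.1 - person_line|) ≤ 5) then
              (some title, some (|p.1 - person_line|))
            else st
          else st)
        st)
    ((none : Option String), (none : Option Int))).1

def pair_persons_with_titles (text : String) (ner_results : List (String × List String)) : List (List (String × Option String)) :=
  let persons := PySem.Dict.getD (PySem.Dict.mk ner_results) "persons" []
  let job_titles := PySem.Dict.getD (PySem.Dict.mk ner_results) "job_titles" []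
  if persons = [] then []
  else
    let lines := (PySem.Str.split? text "\n").getD []
    persons.foldl
      (fun paired person =>
        match pvPersonLineA lines person with
        | none => paired ++ [[("name", some person), ("job_title", (none : Option String))]]
        | some pl => paired ++ [[("name", some person), ("job_title", pvBestTitleA lines job_titles pl)]])
      []

-- ===== PORT B =====
-- [i for i, ln in enumerate(low_lines) if title.lower() in ln]
def pvOccB (low_lines : List String) (title : String) : List Int :=
  ((PySem.List.enumerate low_lines 0).filter
      (fun p => PySem.Str.isIn (PySem.Str.lower title) p.2)).map (·.1)

-- next((i for i, ln in enumerate(low_lines) if lp in ln), None)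
def pvPersonLineB (low_lines : List String) (lp : String) : Option Int :=
  ((PySem.List.enumerate low_lines 0).find? (fun p => PySem.Str.isIn lp p.2)).map (·.1)

-- loop over zip(job_titles, occ): min distance per title from its index list
def pvBestTitleB (pairs : List (String × List Int)) (person_line : Int) : Option String :=
  (pairs.foldl
    (fun (st : Option String × Option Int) tp =>
      let ds := (tp.2.filter (fun i => decide ((|i - person_line|) ≤ 5))).map (fun i => |i - person_line|)
      match PySem.List.min? ds (fun x => x) with
      | none => st
      | some m => if pvLtInf m st.2 then (some tp.1, some m) else st)
    ((none : Option String), (none : Option Int))).1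

def pair_persons_with_titles_alt (text : String) (ner_results : List (String × List String)) : List (List (String × Option String)) :=
  let persons := PySem.Dict.getD (PySem.Dict.mk ner_results) "persons" []
  let job_titles := PySem.Dict.getD (PySem.Dict.mk ner_results) "job_titles" []
  if persons = [] then []
  else
    let low_lines := ((PySem.Str.split? text "\n").getD []).map PySem.Str.lower
    let occ := job_titles.map (fun t => pvOccB low_lines t)
    persons.foldl
      (fun paired person =>
        match pvPersonLineB low_lines (PySem.Str.lower person) with
        | none => paired ++ [[("name", some person), ("job_title", (none : Option String))]]
        | some pl => paired ++ [[("name", some person), ("job_title", pvBestTitleB (job_titles.zip occ) pl)]])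
      []

-- ===== PRECONDITION & SPEC =====
def Spec_pair_persons_with_titles (text : String) (ner_results : List (String × List String)) (out : List (List (String × Option String))) : Prop := out = pair_persons_with_titles_alt text ner_results
instance (text : String) (ner_results : List (String × List String)) (out : List (List (String × Option String))) : Decidable (Spec_pair_persons_with_titles text ner_results out) := by unfold Spec_pair_persons_with_titles; infer_instance

-- ===== CLAIM (what is proved, stated in full; the proofs are below) =====
def Claim_equal_pair_persons_with_titles : Prop := ∀ (text : String) (ner_results : List (String × List String)), Dom_pair_persons_with_titles text ner_results → Spec_pair_persons_with_titles text ner_results (pair_persons_with_titles text ner_results)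

-- ===== LEMMAS AND PROOFS =====

theorem pv_enumerate_map_lower (lines : List String) (s : Int) :
    PySem.List.enumerate (lines.map PySem.Str.lower) s
      = (PySem.List.enumerate lines s).map (fun p => (p.1, PySem.Str.lower p.2)) := by
  induction lines generalizing s with
  | nil => simp [PySem.List.enumerate_nil]
  | cons x xs ih => simp [PySem.List.enumerate_cons, ih]

theorem pv_foldl_break (l : List (Int × String)) (q : Int × String → Bool) (a : Option Int) :
    l.foldl (fun acc p => match acc with
      | some x => some x
      | none => if q p then some p.1 else none) a
      = match a with
        | some x => some x
        | none => (l.find? q).map (·.1) := by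
  induction l generalizing a with
  | nil => cases a <;> simp
  | cons p l ih =>
    cases a with
    | some x => simp [ih]
    | none =>
      by_cases h : q p = true <;> simp [h, ih]

theorem pv_personLine_eq (lines : List String) (person : String) :
    pvPersonLineA lines person = pvPersonLineB (lines.map PySem.Str.lower) (PySem.Str.lower person) := by
  unfold pvPersonLineA pvPersonLineB
  rw [pv_enumerate_map_lower, List.find?_map, pv_foldl_break]
  simp [Function.comp_def]

theorem pv_ltInf_of_le {x d : Int} {o : Option Int} (hxd : x ≤ d) (h : pvLtInf d o = true) :
    pvLtInf x o = true := by
  cases o with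
  | none => rfl
  | some b => simp [pvLtInf] at h ⊢; omega

theorem pv_min?_nil : PySem.List.min? ([] : List Int) (fun x => x) = none :=
  (PySem.List.min?_eq_none_iff _ _).mpr rfl

-- A's inner per-title line loop, on the list of candidate distances, computes B's step
theorem pv_distsFold (title : String) (ds : List Int) (st : Option String × Option Int) :
    ds.foldl (fun st d => if pvLtInf d st.2 && decide (d ≤ 5) then (some title, some d) else st) st
      = match PySem.List.min? (ds.filter (fun d => decide (d ≤ 5))) (fun x => x) with
        | none => st
        | some m => if pvLtInf m st.2 then (some title, some m) else st := by
  induction ds generalizing st with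
  | nil => simp [pv_min?_nil]
  | cons d ds ih =>
    by_cases hd5 : d ≤ 5
    · -- d survives the ≤ 5 filter
      rw [List.foldl_cons]
      rw [show List.filter (fun d => decide (d ≤ 5)) (d :: ds) = d :: List.filter (fun d => decide (d ≤ 5)) ds from by simp [hd5]]
      rw [PySem.List.min?_id_cons]
      by_cases hlt : pvLtInf d st.2 = true
      · rw [show (if pvLtInf d st.2 && decide (d ≤ 5) then (some title, some d) else st) = (some title, some d) from by simp [hlt, hd5], ih]
        cases hR : PySem.List.min? (List.filter (fun d => decide (d ≤ 5)) ds) (fun x => x) with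
        | none =>
          have hnil : List.filter (fun d => decide (d ≤ 5)) ds = [] := by
            rwa [← PySem.List.min?_eq_none_iff (key := fun x : Int => x)]
          simp [hnil, hlt]
        | some m =>
          obtain ⟨r, rs, hcons⟩ : ∃ r rs, List.filter (fun d => decide (d ≤ 5)) ds = r :: rs := by
            cases h' : List.filter (fun d => decide (d ≤ 5)) ds with
            | nil => rw [h'] at hR; simp [pv_min?_nil] at hR
            | cons r rs => exact ⟨r, rs, rfl⟩
          rw [hcons] at hR
          rw [PySem.List.min?_id_cons] at hR
          injection hR with hm
          rw [hcons, List.foldl_cons, List.foldl_assoc (op := min), hm]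
          have hmin2 : pvLtInf (min d m) st.2 = true :=
            pv_ltInf_of_le (min_le_left d m) hlt
          by_cases hmd : m < d
          · have hm2 : min d m = m := by omega
            rw [hm2] at hmin2 ⊢
            have hLm : pvLtInf m (some d) = true := by
              simp [pvLtInf]; omega
            simp [hLm, hmin2]
          · have hm2 : min d m = d := by omega
            rw [hm2]
            have hLm : pvLtInf m (some d) = false := by
              simp [pvLtInf]; omega
            simp [hLm, hlt]
      · -- current distance not better than the running min (some b with b ≤ d)
        have hlt' : pvLtInf d st.2 = false := by
          cases h : pvLtInf d st.2 <;> simp_all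
        have hstep : (if pvLtInf d st.2 && decide (d ≤ 5) then (some title, some d) else st) = st := by
          simp [hlt']
        rw [hstep, ih]
        cases hst : st.2 with
        | none => rw [hst] at hlt'; simp [pvLtInf] at hlt'
        | some b =>
          have hbd : b ≤ d := by
            rw [hst] at hlt'
            simp only [pvLtInf, decide_eq_false_iff_not] at hlt'
            omega
          cases hR : PySem.List.min? (List.filter (fun d => decide (d ≤ 5)) ds) (fun x => x) with
          | none =>
            have hnil : List.filter (fun d => decide (d ≤ 5)) ds = [] := by
              rwa [← PySem.List.min?_eq_none_iff (key := fun x : Int => x)]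
            have hnd : pvLtInf d (some b) = false := by simp [pvLtInf]; omega
            simp [hnil, hnd]
          | some m =>
            obtain ⟨r, rs, hcons⟩ : ∃ r rs, List.filter (fun d => decide (d ≤ 5)) ds = r :: rs := by
              cases h' : List.filter (fun d => decide (d ≤ 5)) ds with
              | nil => rw [h'] at hR; simp [pv_min?_nil] at hR
              | cons r rs => exact ⟨r, rs, rfl⟩
            rw [hcons] at hR
            rw [PySem.List.min?_id_cons] at hR
            injection hR with hm
            rw [hcons, List.foldl_cons, List.foldl_assoc (op := min), hm]
            by_cases hmb : m < b
            · have hm2 : min d m = m := by omega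
              have h1 : pvLtInf m (some b) = true := by simp [pvLtInf]; omega
              have h2 : pvLtInf (min d m) (some b) = true := by simp [pvLtInf, hm2]; omega
              simp [h1, hm2]
            · have h1 : pvLtInf m (some b) = false := by simp [pvLtInf]; omega
              have h2 : pvLtInf (min d m) (some b) = false := by simp [pvLtInf]; omega
              simp [h1, h2]
    · -- d dropped by the ≤ 5 filter; the step leaves st unchanged
      rw [List.foldl_cons]
      have hstep : (if pvLtInf d st.2 && decide (d ≤ 5) then (some title, some d) else st) = st := by
        simp [hd5]
      rw [hstep, ih]
      simp [hd5]

theorem pv_occ_eq (lines : List String) (t : String) :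
    pvOccB (lines.map PySem.Str.lower) t
      = ((PySem.List.enumerate lines 0).filter
          (fun p => PySem.Str.isIn (PySem.Str.lower t) (PySem.Str.lower p.2))).map (·.1) := by
  unfold pvOccB
  rw [pv_enumerate_map_lower, List.filter_map, List.map_map]
  rfl

theorem pv_bestTitle_eq (lines : List String) (job_titles : List String) (pl : Int) :
    pvBestTitleA lines job_titles pl
      = pvBestTitleB (job_titles.zip (job_titles.map (fun t => pvOccB (lines.map PySem.Str.lower) t))) pl := by
  unfold pvBestTitleA pvBestTitleB
  rw [← List.map_prod_left_eq_zip, List.foldl_map]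
  congr 1
  apply List.foldl_ext
  intro st title _
  -- A's inner loop over all lines = fold over the candidate distances of this title
  have hA : (PySem.List.enumerate lines 0).foldl
      (fun st p =>
        if PySem.Str.isIn (PySem.Str.lower title) (PySem.Str.lower p.2) then
          if pvLtInf (|p.1 - pl|) st.2 && decide ((|p.1 - pl|) ≤ 5) then
            (some title, some (|p.1 - pl|))
          else st
        else st) st
      = (((PySem.List.enumerate lines 0).filter
            (fun p => PySem.Str.isIn (PySem.Str.lower title) (PySem.Str.lower p.2))).map
          (fun p => |p.1 - pl|)).foldl
          (fun st d => if pvLtInf d st.2 && decide (d ≤ 5) then (some title, some d) else st) st := by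
    rw [List.foldl_map, List.foldl_filter]
  rw [hA, pv_distsFold, pv_occ_eq]
  simp only [List.filter_map, List.map_map, Function.comp_def]

theorem pair_persons_with_titles_eq (text : String) (ner_results : List (String × List String)) :
    pair_persons_with_titles text ner_results = pair_persons_with_titles_alt text ner_results := by
  unfold pair_persons_with_titles pair_persons_with_titles_alt
  by_cases hp : PySem.Dict.getD (PySem.Dict.mk ner_results) "persons" [] = []
  · simp [hp]
  · simp only [hp]
    apply List.foldl_ext
    intro paired person _
    rw [pv_personLine_eq]
    simp only [pv_bestTitle_eq]

-- ===== VERDICT (by name: the statement is the Claim_ definition above) =====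
theorem pair_persons_with_titles_spec : Claim_equal_pair_persons_with_titles := by
  intro text ner_results _
  unfold Spec_pair_persons_with_titles
  exact pair_persons_with_titles_eq text ner_results
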